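-- pv_equiv track=rewrite | github.com/sanketwagh147/Python_Learning | EDX Object Oriented Programming/Final Test/Treasure Hunt.py | treasure_hunt
-- ===== SOURCE A (Python) =====
-- def treasure_hunt(list_of_tuples):
--     lat = ["East", "West"]
--     lon = ["North", "South"]
--     ret_list = []
--     a=0
--     b=0
--     for step in list_of_tuples:
--         if step[0] in lat:
--             if step[0] == "East":
--                 a += step[1]
--             else:
--                 a -= step[1]
--
--         if step[0] in lon:
--             if step[0] == "North":
--                 b += step[1]
--             else:
--                 b -= step[1]
--     return (a, b)
-- ===== SOURCE B (Python) =====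
-- def treasure_hunt(list_of_tuples):
--     totals = {}
--     for name, dist in list_of_tuples:
--         totals[name] = totals.get(name, 0) + dist
--     return (totals.get("East", 0) - totals.get("West", 0),
--             totals.get("North", 0) - totals.get("South", 0))
-- ===== Notes on version B (the rewrite author's own statement) =====
-- stated objective: alternative
-- what changed: B first aggregates the steps into a per-direction-name total dictionary with a logic-free grouping loop, then derives the coordinates as East-West and North-South subtractions afterwards, instead of A's per-step membership-tested branch updates of the coordinates.
import Mathlib
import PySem

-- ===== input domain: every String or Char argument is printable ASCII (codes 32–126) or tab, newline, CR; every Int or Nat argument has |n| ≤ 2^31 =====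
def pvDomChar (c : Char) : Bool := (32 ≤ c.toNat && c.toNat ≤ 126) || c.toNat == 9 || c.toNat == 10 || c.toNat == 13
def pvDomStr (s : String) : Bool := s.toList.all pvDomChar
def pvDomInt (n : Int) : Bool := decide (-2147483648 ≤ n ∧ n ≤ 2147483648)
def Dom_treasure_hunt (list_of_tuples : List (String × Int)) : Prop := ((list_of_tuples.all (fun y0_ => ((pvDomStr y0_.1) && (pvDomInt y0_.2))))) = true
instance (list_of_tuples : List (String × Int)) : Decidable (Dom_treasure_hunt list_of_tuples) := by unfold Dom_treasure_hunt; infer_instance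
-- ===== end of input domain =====

-- B replaces A's per-step branch updates by a group-then-compute decomposition: a logic-free
-- loop summing distances per direction name into a dict, then two subtractions (alternative; same cost).

-- ===== PORT A =====
def treasure_hunt (list_of_tuples : List (String × Int)) : Int × Int :=
  let lat : List String := ["East", "West"]
  let lon : List String := ["North", "South"]
  let ab := list_of_tuples.foldl (fun (ab : Int × Int) step =>
    let a := if step.1 ∈ lat then (if step.1 = "East" then ab.1 + step.2 else ab.1 - step.2) else ab.1
    let b := if step.1 ∈ lon then (if step.1 = "North" then ab.2 + step.2 else ab.2 - step.2) else ab.2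
    (a, b)) (0, 0)
  (ab.1, ab.2)

-- ===== PORT B =====
def treasure_hunt_alt (list_of_tuples : List (String × Int)) : Int × Int :=
  let totals := list_of_tuples.foldl
    (fun (d : PySem.Dict String Int) step => d.insert step.1 (d.getD step.1 0 + step.2))
    PySem.Dict.empty
  (totals.getD "East" 0 - totals.getD "West" 0,
   totals.getD "North" 0 - totals.getD "South" 0)

-- ===== PRECONDITION & SPEC =====
def Spec_treasure_hunt (list_of_tuples : List (String × Int)) (out : Int × Int) : Prop := out = treasure_hunt_alt list_of_tuples
instance (list_of_tuples : List (String × Int)) (out : Int × Int) : Decidable (Spec_treasure_hunt list_of_tuples out) := by unfold Spec_treasure_hunt; infer_instance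

-- ===== CLAIM =====
def Claim_equal_treasure_hunt : Prop := ∀ (list_of_tuples : List (String × Int)), Dom_treasure_hunt list_of_tuples → Spec_treasure_hunt list_of_tuples (treasure_hunt list_of_tuples)

-- ===== LEMMAS AND PROOFS =====

/-- total distance recorded for direction name `s` in the list -/
def dirTotal : List (String × Int) → String → Int
  | [], _ => 0
  | p :: t, s => (if p.1 = s then p.2 else 0) + dirTotal t s

theorem foldB_getD (l : List (String × Int)) (d : PySem.Dict String Int) (s : String) :
    (l.foldl (fun (d : PySem.Dict String Int) step => d.insert step.1 (d.getD step.1 0 + step.2)) d).getD s 0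
      = d.getD s 0 + dirTotal l s := by
  induction l generalizing d with
  | nil => simp [dirTotal]
  | cons p t ih =>
    simp only [List.foldl_cons, dirTotal, ih, PySem.Dict.getD_insert]
    by_cases h : s = p.1
    · simp [h]; ring
    · have h' : ¬ p.1 = s := fun hh => h hh.symm
      simp [h, h']

theorem foldA_eq (l : List (String × Int)) (ab : Int × Int) :
    l.foldl (fun (ab : Int × Int) step =>
      let a := if step.1 ∈ ["East", "West"] then (if step.1 = "East" then ab.1 + step.2 else ab.1 - step.2) else ab.1
      let b := if step.1 ∈ ["North", "South"] then (if step.1 = "North" then ab.2 + step.2 else ab.2 - step.2) else ab.2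
      ((a, b) : Int × Int)) ab
    = (ab.1 + dirTotal l "East" - dirTotal l "West",
       ab.2 + dirTotal l "North" - dirTotal l "South") := by
  induction l generalizing ab with
  | nil => simp [dirTotal]
  | cons p t ih =>
    simp only [List.foldl_cons, ih, dirTotal]
    by_cases h1 : p.1 = "East"
    · simp [h1]; ring
    · by_cases h2 : p.1 = "West"
      · simp [h2]; ring
      · by_cases h3 : p.1 = "North"
        · simp [h3]; ring
        · by_cases h4 : p.1 = "South"
          · simp [h4]; ring
          · simp [h1, h2, h3, h4]

-- ===== VERDICT =====
theorem treasure_hunt_spec : Claim_equal_treasure_hunt := by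
  intro l _
  show treasure_hunt l = treasure_hunt_alt l
  simp only [treasure_hunt, treasure_hunt_alt, foldA_eq, foldB_getD]
  simp [PySem.Dict.empty, PySem.Dict.getD, PySem.Dict.get?]
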